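-- pv_equiv track=rewrite | github.com/michal-lopuszynski-tcl/ptprun | tests/test_extraction.py | _match_orbits
-- ===== SOURCE A (Python) =====
-- def _match_orbits(true_orbits, found_orbits, verbose=True):
--     matched_orbits = []
--     for orbit in true_orbits:
--         for found_orbit in found_orbits:
--             if found_orbit == orbit:
--                 matched_orbits += [orbit]
--
--     unmatched_true_orbits = [o for o in true_orbits if o not in matched_orbits]
--     unmatched_found_orbits = [o for o in found_orbits if o not in matched_orbits]
--     return matched_orbits, unmatched_true_orbits, unmatched_found_orbits
-- ===== SOURCE B (Python) =====
-- def _match_orbits(true_orbits, found_orbits, verbose=True):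
--     true_keys = set(tuple(o) for o in true_orbits)
--     cnt = {}
--     unmatched_found_orbits = []
--     for o in found_orbits:
--         k = tuple(o)
--         cnt[k] = cnt.get(k, 0) + 1
--         if k not in true_keys:
--             unmatched_found_orbits.append(o)
--     matched_orbits = []
--     unmatched_true_orbits = []
--     for o in true_orbits:
--         c = cnt.get(tuple(o), 0)
--         if c:
--             matched_orbits += [o] * c
--         else:
--             unmatched_true_orbits.append(o)
--     return matched_orbits, unmatched_true_orbits, unmatched_found_orbits
-- ===== Notes on version B (the rewrite author's own statement) =====
-- stated objective: alternative
-- what changed: Replaces A's nested equality scan and two 'o in matched' list scans by two single passes with pair accumulators: one pass over found_orbits builds a count dict and collects unmatched found orbits against a precomputed set of true orbits, one pass over true_orbits splits it into matched (replicated by count) and unmatched.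
import Mathlib
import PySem

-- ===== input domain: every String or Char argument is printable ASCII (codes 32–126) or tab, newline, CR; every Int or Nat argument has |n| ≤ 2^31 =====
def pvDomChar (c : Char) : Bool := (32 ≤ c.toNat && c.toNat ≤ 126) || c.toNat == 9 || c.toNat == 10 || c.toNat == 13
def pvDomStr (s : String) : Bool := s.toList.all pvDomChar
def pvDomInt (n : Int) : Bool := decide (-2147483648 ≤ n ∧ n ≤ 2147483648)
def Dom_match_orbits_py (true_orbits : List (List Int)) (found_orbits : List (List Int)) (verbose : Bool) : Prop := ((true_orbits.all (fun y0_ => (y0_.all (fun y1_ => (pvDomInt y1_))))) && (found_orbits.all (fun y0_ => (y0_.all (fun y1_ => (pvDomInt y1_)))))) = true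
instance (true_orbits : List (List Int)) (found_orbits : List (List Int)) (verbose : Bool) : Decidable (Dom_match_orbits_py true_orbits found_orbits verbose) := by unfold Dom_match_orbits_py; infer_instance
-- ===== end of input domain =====

-- B replaces A's nested scans by two single passes with pair accumulators: one over found_orbits
-- (count dict + unmatched-found against a set of true orbits), one over true_orbits (matched/unmatched split).
-- ===== PORT A =====
def match_orbits_py (true_orbits : List (List Int)) (found_orbits : List (List Int)) (verbose : Bool) : List (List Int) × List (List Int) × List (List Int) :=
  let matched_orbits : List (List Int) :=
    true_orbits.foldl (fun acc orbit =>
      found_orbits.foldl (fun acc2 found_orbit =>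
        if found_orbit == orbit then acc2 ++ [orbit] else acc2) acc) []
  let unmatched_true_orbits := true_orbits.filter (fun o => !(matched_orbits.contains o))
  let unmatched_found_orbits := found_orbits.filter (fun o => !(matched_orbits.contains o))
  (matched_orbits, unmatched_true_orbits, unmatched_found_orbits)

-- ===== PORT B =====
def match_orbits_py_alt (true_orbits : List (List Int)) (found_orbits : List (List Int)) (verbose : Bool) : List (List Int) × List (List Int) × List (List Int) :=
  let true_keys : PySem.Set (List Int) := PySem.Set.ofList true_orbits
  let st1 : PySem.Dict (List Int) Int × List (List Int) :=
    found_orbits.foldl (fun st o =>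
      (st.1.modify o 0 (· + 1),
       if !(PySem.Set.contains true_keys o) then st.2 ++ [o] else st.2))
      (PySem.Dict.empty, [])
  let st2 : List (List Int) × List (List Int) :=
    true_orbits.foldl (fun st o =>
      let c := st1.1.getD o 0
      if c ≠ 0 then (st.1 ++ List.replicate c.toNat o, st.2) else (st.1, st.2 ++ [o]))
      ([], [])
  (st2.1, st2.2, st1.2)

-- ===== PRECONDITION & SPEC =====
def Spec_match_orbits_py (true_orbits : List (List Int)) (found_orbits : List (List Int)) (verbose : Bool) (out : List (List Int) × List (List Int) × List (List Int)) : Prop := out = match_orbits_py_alt true_orbits found_orbits verbose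
instance (true_orbits : List (List Int)) (found_orbits : List (List Int)) (verbose : Bool) (out : List (List Int) × List (List Int) × List (List Int)) : Decidable (Spec_match_orbits_py true_orbits found_orbits verbose out) := by unfold Spec_match_orbits_py; infer_instance

-- ===== CLAIM (what is proved, stated in full; the proofs are below) =====
def Claim_equal_match_orbits_py : Prop := ∀ (true_orbits : List (List Int)) (found_orbits : List (List Int)) (verbose : Bool), Dom_match_orbits_py true_orbits found_orbits verbose → Spec_match_orbits_py true_orbits found_orbits verbose (match_orbits_py true_orbits found_orbits verbose)

-- ===== LEMMAS AND PROOFS =====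

-- a fold whose two state components are updated independently splits into two folds
lemma pair_foldl {α β γ : Type} (g1 : β → α → β) (g2 : γ → α → γ) (l : List α) (a : β) (b : γ) :
    l.foldl (fun st x => (g1 st.1 x, g2 st.2 x)) (a, b) = (l.foldl g1 a, l.foldl g2 b) := by
  induction l generalizing a b with
  | nil => rfl
  | cons h t ih => simpa using ih (g1 a h) (g2 b h)

lemma inner_count (orbit : List Int) (found : List (List Int)) (acc : List (List Int)) :
    found.foldl (fun acc2 f => if f == orbit then acc2 ++ [orbit] else acc2) acc
      = acc ++ List.replicate (found.count orbit) orbit := by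
  induction found generalizing acc with
  | nil => simp
  | cons h tl ih =>
    rw [List.foldl_cons, ih]
    by_cases hh : h = orbit
    · subst hh
      simp [List.count_cons, ← List.replicate_succ, ← List.replicate_succ']
    · simp [List.count_cons, hh]

lemma matchedA_eq (t f : List (List Int)) :
    (t.foldl (fun acc orbit =>
       f.foldl (fun acc2 fo => if fo == orbit then acc2 ++ [orbit] else acc2) acc) [])
    = t.flatMap (fun o => List.replicate (f.count o) o) := by
  have hfn : (fun (acc : List (List Int)) (orbit : List Int) =>
      f.foldl (fun acc2 fo => if fo == orbit then acc2 ++ [orbit] else acc2) acc)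
      = (fun acc o => acc ++ List.replicate (f.count o) o) := by
    funext acc o; exact inner_count o f acc
  rw [hfn, PySem.List.foldl_append_eq_flatMap]
  simp

lemma mem_matchedA (t f : List (List Int)) (o : List Int) :
    (o ∈ t.flatMap (fun x => List.replicate (f.count x) x)) ↔ (o ∈ t ∧ o ∈ f) := by
  simp only [List.mem_flatMap, List.mem_replicate]
  constructor
  · rintro ⟨x, hx, hn, rfl⟩
    exact ⟨hx, List.count_pos_iff.mp (Nat.pos_of_ne_zero hn)⟩
  · rintro ⟨ht, hf⟩
    exact ⟨o, ht, Nat.pos_iff_ne_zero.mp (List.count_pos_iff.mpr hf), rfl⟩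

-- B's second fold splits: the matched part is the flatMap of replicates, the unmatched part a filter
lemma split_fold (f : List (List Int)) (t : List (List Int)) :
    (t.foldl (fun (st : List (List Int) × List (List Int)) o =>
        let c := (PySem.Dict.counter f).getD o 0
        if c ≠ 0 then (st.1 ++ List.replicate c.toNat o, st.2) else (st.1, st.2 ++ [o]))
      ([], []))
    = (t.flatMap (fun x => List.replicate (f.count x) x),
       t.filter (fun o => !(f.contains o))) := by
  have hfn : (fun (st : List (List Int) × List (List Int)) o =>
        let c := (PySem.Dict.counter f).getD o 0
        if c ≠ 0 then (st.1 ++ List.replicate c.toNat o, st.2) else (st.1, st.2 ++ [o]))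
      = (fun st o => (st.1 ++ List.replicate (f.count o) o,
                      if !(f.contains o) then st.2 ++ [o] else st.2)) := by
    funext st o
    simp only [PySem.Dict.getD_counter, Int.toNat_natCast]
    by_cases h : o ∈ f
    · have hc : f.count o ≠ 0 := Nat.pos_iff_ne_zero.mp (List.count_pos_iff.mpr h)
      simp [h, hc]
    · have hc : f.count o = 0 := List.count_eq_zero.mpr h
      simp [h, hc]
  rw [hfn, pair_foldl (fun a o => a ++ List.replicate (f.count o) o)
        (fun b o => if !(f.contains o) then b ++ [o] else b),
      PySem.List.foldl_append_eq_flatMap, PySem.List.foldl_append_if_eq_filter]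
  simp

-- ===== VERDICT (by name: the statement is the Claim_ definition above) =====
theorem match_orbits_py_spec : Claim_equal_match_orbits_py := by
  intro t f verbose _
  unfold Spec_match_orbits_py match_orbits_py match_orbits_py_alt
  simp only
  have hcnt : (f.foldl (fun (st : PySem.Dict (List Int) Int × List (List Int)) o =>
      (st.1.modify o 0 (· + 1),
       if !(PySem.Set.contains (PySem.Set.ofList t) o) then st.2 ++ [o] else st.2))
      (PySem.Dict.empty, []))
      = (PySem.Dict.counter f,
         f.filter (fun o => !(PySem.Set.contains (PySem.Set.ofList t) o))) := by
    rw [pair_foldl (fun (d : PySem.Dict (List Int) Int) o => d.modify o 0 (· + 1))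
          (fun b o => if !(PySem.Set.contains (PySem.Set.ofList t) o) then b ++ [o] else b),
        PySem.Dict.counter_eq_foldl, PySem.List.foldl_append_if_eq_filter]
    simp
  rw [hcnt]
  simp only
  rw [split_fold, matchedA_eq]
  refine Prod.ext rfl (Prod.ext ?_ ?_) <;> simp only
  · apply List.filter_congr
    intro x hx
    by_cases h : x ∈ f
    · simp [mem_matchedA, hx, h, List.count_eq_zero]
    · simp [mem_matchedA, hx, h, List.count_eq_zero]
  · apply List.filter_congr
    intro x hx
    by_cases h : x ∈ t <;>
      simp [mem_matchedA, PySem.Set.contains, PySem.Set.mem_ofList, hx, h,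
            List.count_eq_zero, Nat.pos_iff_ne_zero]
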